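-- pv_equiv track=rewrite | github.com/Aasthaengg/IBMdataset | Python_codes/p03816/s803764385.py | solve
-- ===== SOURCE A (Python) =====
-- import collections
--
-- def is_even(n):
--     return n % 2 == 0
--
-- def is_odd(n):
--     return not is_even(n)
--
-- def solve(n, a):
--     counter = collections.Counter(a)
--
--     evens = 0
--     odds = 0
--     for item in counter.items():
--         k, v = item
--         if is_odd(v):
--             odds += 1
--         else:
--             evens += 1
--
--     if is_even(evens):
--         return odds + evens
--     else:
--         return odds + (evens - 1)
-- ===== SOURCE B (Python) =====
-- def solve(n, a):
--     s = sorted(a)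
--     odds = 0
--     evens = 0
--     if s:
--         prev = s[0]
--         run = 1
--         for x in s[1:]:
--             if x == prev:
--                 run += 1
--             else:
--                 if run % 2 == 1:
--                     odds += 1
--                 else:
--                     evens += 1
--                 prev = x
--                 run = 1
--         if run % 2 == 1:
--             odds += 1
--         else:
--             evens += 1
--     if evens % 2 == 0:
--         return odds + evens
--     else:
--         return odds + evens - 1
-- ===== Notes on version B (the rewrite author's own statement) =====
-- stated objective: alternative
-- what changed: Replaces the Counter hash map and its items loop by sorting a copy of a and classifying each maximal run of equal values as odd or even in one scan.
import Mathlib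
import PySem

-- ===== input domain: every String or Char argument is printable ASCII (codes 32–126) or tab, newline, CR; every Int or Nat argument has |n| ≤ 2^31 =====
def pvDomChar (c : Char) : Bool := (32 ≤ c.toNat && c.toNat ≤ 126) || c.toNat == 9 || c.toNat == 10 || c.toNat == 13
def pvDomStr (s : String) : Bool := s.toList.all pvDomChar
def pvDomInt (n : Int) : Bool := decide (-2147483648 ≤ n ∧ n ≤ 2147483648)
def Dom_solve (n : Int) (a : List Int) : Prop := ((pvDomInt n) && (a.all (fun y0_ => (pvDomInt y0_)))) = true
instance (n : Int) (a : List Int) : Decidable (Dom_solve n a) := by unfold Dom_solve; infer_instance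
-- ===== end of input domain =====

-- B replaces A's Counter hash map by sorting a copy of `a` and classifying maximal runs
-- of equal values in one scan (objective: alternative algorithm, same result).

-- ===== PORT A =====
def isEvenA (v : Int) : Bool := PySem.Int.mod v 2 == 0

def isOddA (v : Int) : Bool := !(isEvenA v)

def solve (n : Int) (a : List Int) : Int :=
  let counter := PySem.Dict.counter a
  let eo := counter.items.foldl
    (fun (s : Int × Int) item => if isOddA item.2 then (s.1, s.2 + 1) else (s.1 + 1, s.2))
    ((0 : Int), (0 : Int))
  if isEvenA eo.1 then eo.2 + eo.1 else eo.2 + (eo.1 - 1)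

-- ===== PORT B =====
def bumpRun (run odds evens : Int) : Int × Int :=
  if PySem.Int.mod run 2 = 1 then (odds + 1, evens) else (odds, evens + 1)

def scanRuns : List Int → Int → Int → Int → Int → Int × Int
  | [], _, run, odds, evens => bumpRun run odds evens
  | x :: xs, prev, run, odds, evens =>
      if x = prev then scanRuns xs prev (run + 1) odds evens
      else
        let oe := bumpRun run odds evens
        scanRuns xs x 1 oe.1 oe.2

def solve_alt (n : Int) (a : List Int) : Int :=
  let s := PySem.List.sorted a (fun x => x) false
  let oe : Int × Int :=
    match s with
    | [] => (0, 0)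
    | x :: xs => scanRuns xs x 1 0 0
  if PySem.Int.mod oe.2 2 = 0 then oe.1 + oe.2 else oe.1 + oe.2 - 1

-- ===== PRECONDITION & SPEC =====
def Spec_solve (n : Int) (a : List Int) (out : Int) : Prop := out = solve_alt n a
instance (n : Int) (a : List Int) (out : Int) : Decidable (Spec_solve n a out) := by unfold Spec_solve; infer_instance

-- ===== CLAIM =====
def Claim_equal_solve : Prop := ∀ (n : Int) (a : List Int), Dom_solve n a → Spec_solve n a (solve n a)

-- ===== LEMMAS AND PROOFS =====
def pOdd (s : List Int) (k : Int) : Bool := s.count k % 2 == 1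

lemma foldA (p : Int → Bool) : ∀ (D : List Int) (e o : Int),
    D.foldl (fun (s : Int × Int) k => if p k then (s.1, s.2 + 1) else (s.1 + 1, s.2)) (e, o)
    = (e + ((D.countP (fun k => !(p k))) : Int), o + (D.countP p : Int)) := by
  intro D
  induction D with
  | nil => intro e o; simp
  | cons k D ih =>
    intro e o
    by_cases hp : p k = true
    · simp [List.foldl_cons, hp, ih]
      ring_nf
    · simp only [List.foldl_cons, if_neg hp]
      rw [ih]
      have hp' : p k = false := by simp at hp; exact hp
      simp [hp']
      push_cast; ring

lemma mod_natCast_two (c : Nat) : PySem.Int.mod (c : Int) 2 = ((c % 2 : Nat) : Int) := by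
  exact_mod_cast PySem.Int.mod_natCast c 2

lemma isOddA_cast (c : Nat) : isOddA (c : Int) = (c % 2 == 1) := by
  have h2 : c % 2 < 2 := Nat.mod_lt _ (by norm_num)
  rw [isOddA, isEvenA, mod_natCast_two]
  by_cases hc : c % 2 = 1
  · simp [hc]
  · have h0 : c % 2 = 0 := by omega
    simp [h0]

lemma bumpRun_cast (c : Nat) (o e : Int) :
    bumpRun (c : Int) o e = if c % 2 == 1 then (o + 1, e) else (o, e + 1) := by
  have h2 : c % 2 < 2 := Nat.mod_lt _ (by norm_num)
  rw [bumpRun, mod_natCast_two]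
  by_cases hc : c % 2 = 1
  · simp [hc]
  · have h0 : c % 2 = 0 := by omega
    simp [h0]

lemma dedup_skip (x : Int) : ∀ (m : List Int) (acc : PySem.Set Int), x ∈ acc →
    List.foldl PySem.Set.add acc m = List.foldl PySem.Set.add acc (m.filter (fun y => !(y == x))) := by
  intro m
  induction m with
  | nil => intro acc _; simp
  | cons y ys ih =>
    intro acc hx
    by_cases hy : y = x
    · subst hy
      have hadd : PySem.Set.add acc y = acc := by
        simp [PySem.Set.add, PySem.Set.contains, hx]
      simp [hadd, ih acc hx]
    · have hx' : x ∈ PySem.Set.add acc y := by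
        simp [PySem.Set.add, PySem.Set.contains]
        split <;> simp [hx]
      simp [hy, ih _ hx']

lemma dedup_sing (x : Int) : ∀ (m : List Int) (acc : PySem.Set Int), x ∉ m → x ∉ acc →
    List.foldl PySem.Set.add (x :: acc) m = x :: List.foldl PySem.Set.add acc m := by
  intro m
  induction m with
  | nil => intro acc _ _; simp
  | cons y ys ih =>
    intro acc hm hacc
    have hyx : y ≠ x := fun h => hm (h ▸ List.mem_cons_self)
    have h1 : PySem.Set.add (x :: acc) y = x :: PySem.Set.add acc y := by
      simp [PySem.Set.add, PySem.Set.contains, hyx]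
      split <;> simp
    have hacc' : x ∉ PySem.Set.add acc y := by
      simp [PySem.Set.add, PySem.Set.contains]
      split
      · exact hacc
      · simp [hacc, Ne.symm hyx]
    simp only [List.foldl_cons, h1]
    exact ih _ (fun h => hm (List.mem_cons_of_mem _ h)) hacc'

lemma dedup_cons_filter (x : Int) (l : List Int) :
    PySem.List.dedup (x :: l) = x :: PySem.List.dedup (l.filter (fun y => !(y == x))) := by
  have h1 : PySem.List.dedup (x :: l) = List.foldl PySem.Set.add [x] l := by
    simp [PySem.List.dedup, PySem.Set.ofList_eq_foldl, PySem.Set.add, PySem.Set.contains]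
  have h2 : PySem.List.dedup (l.filter (fun y => !(y == x))) =
      List.foldl PySem.Set.add [] (l.filter (fun y => !(y == x))) := by
    simp [PySem.List.dedup, PySem.Set.ofList_eq_foldl]
  rw [h1, h2, dedup_skip x l [x] (by simp)]
  have hx : x ∉ l.filter (fun y => !(y == x)) := by
    intro h
    simp [List.mem_filter] at h
  exact dedup_sing x _ [] hx (by simp)

lemma scan_absorb : ∀ (l : List Int) (prev run o e : Int),
    l.Pairwise (· ≤ ·) → (∀ y ∈ l, prev ≤ y) →
    scanRuns l prev run o e =
      (match l.dropWhile (fun y => y == prev) with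
       | [] => bumpRun (run + (l.count prev : Int)) o e
       | x :: xs =>
           let oe := bumpRun (run + (l.count prev : Int)) o e
           scanRuns xs x 1 oe.1 oe.2) := by
  intro l
  induction l with
  | nil => intro prev run o e _ _; simp [scanRuns]
  | cons y ys ih =>
    intro prev run o e hpw hge
    by_cases hy : y = prev
    · subst hy
      have := ih y (run + 1) o e hpw.of_cons (fun z hz => (List.pairwise_cons.mp hpw).1 z hz)
      simp only [scanRuns, if_pos rfl, this, List.dropWhile_cons, beq_self_eq_true, if_pos]
      have hcnt : ((y :: ys).count y : Int) = (ys.count y : Int) + 1 := by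
        simp [List.count_cons]
      rw [hcnt]
      ring_nf
    · have hlt : prev < y := lt_of_le_of_ne (hge y (List.mem_cons_self)) (Ne.symm hy)
      have hnotmem : prev ∉ y :: ys := by
        intro hm
        rcases List.mem_cons.mp hm with h | h
        · exact hy h.symm
        · exact absurd ((List.pairwise_cons.mp hpw).1 prev h) (by omega)
      have hcnt : (y :: ys).count prev = 0 := List.count_eq_zero.mpr hnotmem
      have hdw : (y :: ys).dropWhile (fun z => z == prev) = y :: ys := by
        simp [List.dropWhile_cons, hy]
      simp only [scanRuns, if_neg hy, hdw, hcnt]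
      simp

lemma scan_main : ∀ (N : Nat) (l : List Int), l.length ≤ N → ∀ (x o e : Int),
    (x :: l).Pairwise (· ≤ ·) →
    scanRuns l x 1 o e =
      (o + ((PySem.List.dedup (x :: l)).countP (pOdd (x :: l)) : Int),
       e + ((PySem.List.dedup (x :: l)).countP (fun k => !(pOdd (x :: l) k)) : Int)) := by
  intro N
  induction N with
  | zero =>
    intro l hl x o e _
    have hz : l = [] := List.eq_nil_of_length_eq_zero (Nat.le_zero.mp hl)
    subst hz
    have hm1 : PySem.Int.mod 1 2 = 1 := by decide
    have hd : PySem.List.dedup [x] = [x] := by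
      simp [PySem.List.dedup, PySem.Set.ofList_eq_foldl, PySem.Set.add, PySem.Set.contains]
    have hp : pOdd [x] x = true := by simp [pOdd]
    simp [scanRuns, bumpRun, hm1, hd, List.countP_cons, hp, PySem.Set.ofList_eq_foldl,
      PySem.Set.add, PySem.Set.contains]
  | succ N ih =>
    intro l hl x o e hpw
    have hxle : ∀ y ∈ l, x ≤ y := (List.pairwise_cons.mp hpw).1
    have hlpw : l.Pairwise (· ≤ ·) := hpw.of_cons
    rw [scan_absorb l x 1 o e hlpw hxle]
    set t := l.dropWhile (fun y => y == x) with ht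
    have hsplit : l.takeWhile (fun y => y == x) ++ t = l := List.takeWhile_append_dropWhile
    have htake : ∀ y ∈ l.takeWhile (fun y => y == x), y = x := by
      intro y hy
      have := List.mem_takeWhile_imp hy
      simpa using this
    have hxt : x ∉ t := by
      cases htt : t with
      | nil => simp
      | cons y ys =>
        have hdw' : l.dropWhile (fun y => y == x) = y :: ys := ht.symm.trans htt
        have hne : l.dropWhile (fun y => y == x) ≠ [] := by rw [hdw']; simp
        have hh := List.head_dropWhile_not (fun z => z == x) hne
        simp only [hdw', List.head_cons] at hh
        have hyx' : y ≠ x := by simpa using hh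
        intro hm
        rcases List.mem_cons.mp hm with h | h
        · exact hyx' h.symm
        · have hts : t.Sublist l := ht ▸ List.dropWhile_sublist _
          have htpw : t.Pairwise (· ≤ ·) := hlpw.sublist hts
          have h1 : y ≤ x := (List.pairwise_cons.mp (htt ▸ htpw)).1 x h
          have h2 : x ≤ y := hxle y (hts.mem (htt ▸ List.mem_cons_self))
          exact hyx' (le_antisymm h1 h2)
    have hcountt : t.count x = 0 := List.count_eq_zero.mpr hxt
    have hcnt_l : l.count x = (l.takeWhile (fun y => y == x)).length := by
      conv_lhs => rw [← hsplit]
      rw [List.count_append, hcountt, List.count_eq_length.mpr (fun b hb => (htake b hb).symm)]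
      omega
    have hrun : (1 : Int) + (l.count x : Int) = (((x :: l).count x : Nat) : Int) := by
      simp [List.count_cons]
      push_cast; ring
    have hfilt : l.filter (fun y => !(y == x)) = t := by
      conv_lhs => rw [← hsplit]
      rw [List.filter_append]
      have h1 : (l.takeWhile (fun y => y == x)).filter (fun y => !(y == x)) = [] := by
        apply List.filter_eq_nil_iff.mpr
        intro b hb
        simp [htake b hb]
      have h2 : t.filter (fun y => !(y == x)) = t := by
        apply List.filter_eq_self.mpr
        intro b hb
        have : b ≠ x := fun h => hxt (h ▸ hb)
        simpa using this
      rw [h1, h2, List.nil_append]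
    have hdedup : PySem.List.dedup (x :: l) = x :: PySem.List.dedup t := by
      rw [dedup_cons_filter, hfilt]
    have hcnt_mem : ∀ v ∈ PySem.List.dedup t, (x :: l).count v = t.count v := by
      intro v hv
      have hvt : v ∈ t := (PySem.List.mem_dedup _ _).mp hv
      have hvx : v ≠ x := fun h => hxt (h ▸ hvt)
      rw [List.count_cons]
      conv_lhs => rw [← hsplit]
      rw [List.count_append, List.count_eq_zero.mpr (fun hm => hvx (htake v hm))]
      simp [hvx, Ne.symm hvx]
    have hcongr1 : (PySem.List.dedup t).countP (pOdd (x :: l)) = (PySem.List.dedup t).countP (pOdd t) := by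
      apply List.countP_congr
      intro v hv
      simp [pOdd, hcnt_mem v hv]
    have hcongr2 : (PySem.List.dedup t).countP (fun k => !(pOdd (x :: l) k)) =
        (PySem.List.dedup t).countP (fun k => !(pOdd t k)) := by
      apply List.countP_congr
      intro v hv
      simp [pOdd, hcnt_mem v hv]
    have hR1 : ((PySem.List.dedup (x :: l)).countP (pOdd (x :: l)) : Int) =
        (if (x :: l).count x % 2 == 1 then 1 else 0) + ((PySem.List.dedup t).countP (pOdd t) : Int) := by
      rw [hdedup, List.countP_cons, hcongr1]
      have : pOdd (x :: l) x = ((x :: l).count x % 2 == 1) := rfl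
      rw [this]
      by_cases hpar : ((x :: l).count x % 2 == 1) = true
      · simp [hpar]
        try split_ifs <;> omega
      · simp at hpar
        simp [hpar]
        try split_ifs <;> omega
    have hR2 : ((PySem.List.dedup (x :: l)).countP (fun k => !(pOdd (x :: l) k)) : Int) =
        (if (x :: l).count x % 2 == 1 then 0 else 1) + ((PySem.List.dedup t).countP (fun k => !(pOdd t k)) : Int) := by
      rw [hdedup, List.countP_cons, hcongr2]
      have hthis : pOdd (x :: l) x = ((x :: l).count x % 2 == 1) := rfl
      by_cases hpar : ((x :: l).count x % 2 == 1) = true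
      · simp [hthis, hpar]
        try split_ifs <;> omega
      · simp only [Bool.not_eq_true] at hpar
        simp [hthis, hpar]
        try split_ifs <;> omega
    rw [hrun, bumpRun_cast]
    rw [hR1, hR2]
    cases htt : t with
    | nil =>
      by_cases hpar : ((x :: l).count x % 2 == 1) = true
      · simp [hpar, PySem.List.dedup, PySem.Set.ofList_eq_foldl]
        try split_ifs <;> rw [Prod.mk.injEq] <;> constructor <;> omega
      · simp only [Bool.not_eq_true] at hpar
        simp [hpar, PySem.List.dedup, PySem.Set.ofList_eq_foldl]
        try split_ifs <;> rw [Prod.mk.injEq] <;> constructor <;> omega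
    | cons y ys =>
      have hts : t.Sublist l := ht ▸ List.dropWhile_sublist _
      have htpw' : (y :: ys).Pairwise (· ≤ ·) := htt ▸ hlpw.sublist hts
      have hlen : ys.length ≤ N := by
        have h1 : t.length ≤ l.length := hts.length_le
        rw [htt] at h1
        simp at h1
        omega
      rw [htt] at hcongr1 hcongr2
      by_cases hpar : ((x :: l).count x % 2 == 1) = true
      · simp only [hpar, if_true]
        rw [ih ys hlen y (o + 1) e htpw']
        rw [Prod.mk.injEq]; constructor <;> ring
      · have h0 : ((x :: l).count x % 2 == 1) = false := by simpa using hpar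
        simp only [h0, Bool.false_eq_true, if_false]
        rw [ih ys hlen y o (e + 1) htpw']
        rw [Prod.mk.injEq]; constructor <;> ring

lemma isEvenA_cast (c : Nat) : isEvenA (c : Int) = (c % 2 == 0) := by
  rw [isEvenA, mod_natCast_two]
  by_cases hc : c % 2 = 0
  · simp [hc]
  · have h2 : c % 2 < 2 := Nat.mod_lt _ (by norm_num)
    have h1 : c % 2 = 1 := by omega
    simp [h1]

lemma solve_eq (n : Int) (a : List Int) :
    solve n a = solve_alt n a := by
  unfold solve solve_alt
  simp only [PySem.Dict.items_counter, List.foldl_map]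
  rw [foldA (fun k => isOddA ((a.count k : Nat) : Int)) (PySem.Set.ofList a) 0 0]
  have hpodd : (fun k => isOddA ((a.count k : Nat) : Int)) = pOdd a := by
    funext k
    rw [isOddA_cast]
    rfl
  have hpoddn : (fun k => !(isOddA ((a.count k : Nat) : Int))) = (fun k => !(pOdd a k)) := by
    funext k
    rw [isOddA_cast]
    rfl
  rw [hpodd, hpoddn]
  cases hs : PySem.List.sorted a (fun x => x) false with
  | nil =>
    have ha : a = [] := (PySem.List.sorted_eq_nil_iff _ _ _).mp hs
    subst ha
    norm_num [PySem.Set.ofList_eq_foldl, isEvenA, PySem.Int.mod]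
  | cons x l =>
    have hpw : (x :: l).Pairwise (· ≤ ·) := by
      have h := PySem.List.sorted_pairwise (xs := a) (key := fun x => x)
      rw [hs] at h
      simpa using h
    rw [show (match x :: l with
        | [] => ((0 : Int), (0 : Int))
        | y :: ys => scanRuns ys y 1 0 0) = scanRuns l x 1 0 0 from rfl]
    rw [scan_main l.length l le_rfl x 0 0 hpw]
    have hsp : (x :: l).Perm a := by
      have h := PySem.List.sorted_perm (xs := a) (key := fun x => x) (rev := false)
      rwa [hs] at h
    have hcnt : ∀ k : Int, (x :: l).count k = a.count k := fun k => hsp.count_eq k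
    have hpodd2 : pOdd (x :: l) = pOdd a := by
      funext k
      simp [pOdd, hcnt k]
    have hperm : (PySem.List.dedup (x :: l)).Perm (PySem.Set.ofList a) := by
      apply (List.perm_ext_iff_of_nodup (PySem.List.nodup_dedup _) (PySem.Set.nodup_ofList _)).mpr
      intro v
      rw [PySem.List.mem_dedup, PySem.Set.mem_ofList]
      exact ⟨fun h => hsp.mem_iff.mp h, fun h => hsp.mem_iff.mpr h⟩
    have hc1 : (PySem.List.dedup (x :: l)).countP (pOdd (x :: l)) =
        (PySem.Set.ofList a).countP (pOdd a) := by
      rw [hpodd2, hperm.countP_eq]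
    have hc2 : (PySem.List.dedup (x :: l)).countP (fun k => !(pOdd (x :: l) k)) =
        (PySem.Set.ofList a).countP (fun k => !(pOdd a k)) := by
      rw [hpodd2, hperm.countP_eq]
    rw [hc1, hc2]
    set O := (PySem.Set.ofList a).countP (pOdd a) with hO
    set E := (PySem.Set.ofList a).countP (fun k => !(pOdd a k)) with hE
    simp only [zero_add]
    have hmod : PySem.Int.mod ((E : Nat) : Int) 2 = ((E % 2 : Nat) : Int) := mod_natCast_two E
    by_cases hpar : E % 2 = 0
    · have h1 : isEvenA ((E : Nat) : Int) = true := by rw [isEvenA_cast]; simp [hpar]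
      have h2 : PySem.Int.mod ((E : Nat) : Int) 2 = 0 := by rw [hmod, hpar]; rfl
      rw [if_pos h1, if_pos h2]
    · have h2lt : E % 2 < 2 := Nat.mod_lt _ (by norm_num)
      have hone : E % 2 = 1 := by omega
      have h1 : isEvenA ((E : Nat) : Int) = false := by rw [isEvenA_cast]; simp [hone]
      have h2 : ¬ (PySem.Int.mod ((E : Nat) : Int) 2 = 0) := by rw [hmod, hone]; norm_num
      have h1' : ¬ (isEvenA ((E : Nat) : Int) = true) := by simp [h1]
      rw [if_neg h1', if_neg h2]
      ring

-- ===== VERDICT =====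
theorem solve_spec : Claim_equal_solve := by
  unfold Claim_equal_solve
  intro n a _
  unfold Spec_solve
  exact solve_eq n a
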